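-- pv_equiv track=rewrite | github.com/ukiyun/feup-23_24 | IADP/PYQuizzes/Q13/2nd_try/1.py | vowel_consonants
-- ===== SOURCE A (Python) =====
-- def vowel_consonants(sentence):
--     vowels = "aeiouAEIOU"
--     count = 0
--
--     # Split the sentence into words
--     words = sentence.split()
--
--     for word in words:
--         i = 1
--         while i < len(word) - 1:
--             if word[i - 1] not in vowels and word[i] in vowels and word[i + 1] not in vowels:
--                 count += 1
--             i += 1
--
--     return count
-- ===== SOURCE B (Python) =====
-- def vowel_consonants(sentence):
--     vowels = "aeiouAEIOU"
--     count = 0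
--     p = q = None  # the two characters preceding c in the sentence
--     for c in sentence:
--         if (q is not None and q in vowels
--                 and p is not None and p not in vowels and not p.isspace()
--                 and c not in vowels and not c.isspace()):
--             count += 1
--         p, q = q, c
--     return count
-- ===== Notes on version B (the rewrite author's own statement) =====
-- stated objective: alternative
-- what changed: B drops the split()-into-words pass and the per-word index/while loop entirely and instead makes one streaming pass over the whole sentence carrying the two previous characters, counting a vowel when both lagged neighbours are non-vowel non-whitespace.
import Mathlib
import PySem

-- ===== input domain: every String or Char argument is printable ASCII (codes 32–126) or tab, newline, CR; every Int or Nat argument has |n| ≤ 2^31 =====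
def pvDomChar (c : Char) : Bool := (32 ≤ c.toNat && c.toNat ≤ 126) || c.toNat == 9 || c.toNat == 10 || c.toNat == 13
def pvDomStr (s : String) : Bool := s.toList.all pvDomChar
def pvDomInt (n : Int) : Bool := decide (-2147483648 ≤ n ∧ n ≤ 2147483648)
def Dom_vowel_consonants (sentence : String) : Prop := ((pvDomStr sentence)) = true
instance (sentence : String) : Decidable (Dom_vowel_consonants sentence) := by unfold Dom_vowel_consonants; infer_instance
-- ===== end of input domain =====

-- B replaces A's split-into-words + per-word index loop by one streaming pass over the
-- sentence that carries the two previous characters (objective: alternative decomposition).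

-- shared constant (A's and B's `vowels = "aeiouAEIOU"`; `c in vowels`)
def pvVowels : List Char := "aeiouAEIOU".toList
def pvIsVowel (c : Char) : Bool := pvVowels.contains c

-- ===== PORT A =====
-- the `while i < len(word) - 1` loop; word[j] for j in range is exact as getD (indices 0 ≤ j < len)
def vcWhileA (word : List Char) (i : Nat) (count : Int) : Int :=
  if _h : (i : Int) < (word.length : Int) - 1 then
    vcWhileA word (i + 1)
      (if !pvIsVowel (word.getD (i - 1) ' ') && pvIsVowel (word.getD i ' ')
          && !pvIsVowel (word.getD (i + 1) ' ') then count + 1 else count)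
  else count
termination_by word.length - i
decreasing_by omega

def vowel_consonants (sentence : String) : Int :=
  (PySem.Chars.split₀ sentence.toList).foldl (fun count w => vcWhileA w 1 count) 0

-- ===== PORT B =====
-- the single for-loop over the characters, with p q the two previous characters (None at start)
def vcScanB (p q : Option Char) (cs : List Char) (count : Int) : Int :=
  match cs with
  | [] => count
  | c :: rest =>
    vcScanB q (some c) rest
      (if (match q with | some b => pvIsVowel b | none => false)
          && (match p with | some a => !pvIsVowel a && !PySem.Chars.isspace a | none => false)
          && !pvIsVowel c && !PySem.Chars.isspace c then count + 1 else count)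

def vowel_consonants_alt (sentence : String) : Int :=
  vcScanB none none sentence.toList 0

-- ===== PRECONDITION & SPEC =====
def Spec_vowel_consonants (sentence : String) (out : Int) : Prop := out = vowel_consonants_alt sentence
instance (sentence : String) (out : Int) : Decidable (Spec_vowel_consonants sentence out) := by unfold Spec_vowel_consonants; infer_instance

-- ===== CLAIM (what is proved, stated in full; the proofs are below) =====
def Claim_equal_vowel_consonants : Prop := ∀ (sentence : String), Dom_vowel_consonants sentence → Spec_vowel_consonants sentence (vowel_consonants sentence)

-- ===== LEMMAS AND PROOFS =====

-- pure forward scans used by the proof (not by the ports)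

def pvTermB (p q : Option Char) (c : Char) : Bool :=
  (match q with | some b => pvIsVowel b | none => false)
  && (match p with | some a => !pvIsVowel a && !PySem.Chars.isspace a | none => false)
  && !pvIsVowel c && !PySem.Chars.isspace c

def cntB (p q : Option Char) : List Char → Int
  | [] => 0
  | c :: rest => (if pvTermB p q c then 1 else 0) + cntB q (some c) rest

def pvTermW (p q : Option Char) (c : Char) : Bool :=
  (match p with | some a => !pvIsVowel a | none => false)
  && (match q with | some b => pvIsVowel b | none => false)
  && !pvIsVowel c

def cntW (p q : Option Char) : List Char → Int
  | [] => 0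
  | c :: rest => (if pvTermW p q c then 1 else 0) + cntW q (some c) rest

def shift2 (p q : Option Char) : List Char → Option Char × Option Char
  | [] => (p, q)
  | c :: rest => shift2 q (some c) rest

def pvS (ws : List (List Char)) : Int := (ws.map (fun w => cntW none none w)).sum

def pvOptWs (o : Option Char) : Prop :=
  match o with | none => True | some c => PySem.Chars.isspace c = true

def pvInv (p q : Option Char) (cur : List Char) : Prop :=
  cur.all (fun c => !PySem.Chars.isspace c) = true ∧
  (match cur with
   | [] => pvOptWs q
   | [x] => q = some x ∧ pvOptWs p
   | x :: y :: _ => q = some x ∧ p = some y)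

lemma vcScanB_acc (cs : List Char) : ∀ (p q : Option Char) (k : Int),
    vcScanB p q cs k = k + cntB p q cs := by
  induction cs with
  | nil => intro p q k; simp [vcScanB, cntB]
  | cons c rest ih =>
    intro p q k
    simp only [vcScanB, cntB, ih]
    unfold pvTermB
    split_ifs <;> ring

lemma cntB_nil (p q : Option Char) : cntB p q [] = 0 := rfl

lemma pvS_append (a b : List (List Char)) : pvS (a ++ b) = pvS a + pvS b := by
  simp [pvS]

lemma vowel_not_ws (b : Char) (h : pvIsVowel b = true) : PySem.Chars.isspace b = false := by
  have hb : b ∈ pvVowels := by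
    simpa [pvIsVowel] using h
  have hv : pvVowels = ['a','e','i','o','u','A','E','I','O','U'] := by rfl
  rw [hv] at hb
  fin_cases hb <;> rfl

-- step of the while loop as a forward scan on the suffix
lemma vcWhileA_eq (w : List Char) : ∀ (i : Nat) (k : Int), 1 ≤ i →
    vcWhileA w i k = k + cntW (w[i-1]?) (w[i]?) (w.drop (i+1)) := by
  intro i
  induction hn : w.length - i using Nat.strong_induction_on generalizing i with
  | _ n ih =>
    intro k hi
    rw [vcWhileA]
    by_cases h : (i : Int) < (w.length : Int) - 1
    · rw [dif_pos h]
      have hlen : i + 1 < w.length := by omega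
      have h1 : w[i-1]? = some (w.getD (i-1) ' ') := by
        rw [List.getElem?_eq_getElem (by omega), List.getD_eq_getElem _ _ (by omega)]
      have h2 : w[i]? = some (w.getD i ' ') := by
        rw [List.getElem?_eq_getElem (by omega), List.getD_eq_getElem _ _ (by omega)]
      have h4 : w[i+1]? = some (w.getD (i+1) ' ') := by
        rw [List.getElem?_eq_getElem (by omega), List.getD_eq_getElem _ _ hlen]
      have h3 : w.drop (i+1) = w.getD (i+1) ' ' :: w.drop (i+2) := by
        rw [List.drop_eq_getElem_cons hlen, List.getD_eq_getElem _ _ hlen]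
      rw [ih (w.length - (i+1)) (by omega) (i+1) rfl _ (by omega), h3, Nat.add_sub_cancel]
      simp only [cntW, pvTermW, h1, h2, ← h4, show i + 1 + 1 = i + 2 from rfl]
      by_cases hC : (!pvIsVowel (w.getD (i-1) ' ') && pvIsVowel (w.getD i ' ')
          && !pvIsVowel (w.getD (i+1) ' ')) = true
      · rw [if_pos hC, if_pos hC]; omega
      · rw [if_neg hC, if_neg hC]; omega
    · rw [dif_neg h]
      have hge : w.length ≤ i + 1 := by omega
      rw [List.drop_eq_nil_of_le hge, cntW]; omega

lemma cntW_start (w : List Char) (k : Int) :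
    vcWhileA w 1 k = k + cntW none none w := by
  rw [vcWhileA_eq w 1 k (le_refl 1)]
  match w with
  | [] => simp [cntW]
  | [a] => simp [cntW, pvTermW]
  | a :: b :: rest =>
    simp only [cntW, pvTermW]
    simp [List.drop]

lemma foldA_eq (ws : List (List Char)) : ∀ (k : Int),
    ws.foldl (fun c w => vcWhileA w 1 c) k = k + pvS ws := by
  induction ws with
  | nil => intro k; simp [pvS]
  | cons w rest ih =>
    intro k
    simp only [List.foldl, pvS, List.map, List.sum_cons] at *
    rw [ih, cntW_start]; omega

lemma go_acc (l : List Char) : ∀ (cur : List Char) (acc : List (List Char)),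
    PySem.Chars.split₀.go l cur acc = acc.reverse ++ PySem.Chars.split₀.go l cur [] := by
  induction l with
  | nil =>
    intro cur acc
    simp only [PySem.Chars.split₀.go]
    split_ifs <;> simp
  | cons c rest ih =>
    intro cur acc
    simp only [PySem.Chars.split₀.go]
    split_ifs with h1 h2
    · exact ih [] acc
    · rw [ih [] (cur.reverse :: acc), ih [] [cur.reverse]]
      simp
    · exact ih (c :: cur) acc

lemma cntW_snoc (xs : List Char) : ∀ (p q : Option Char) (c : Char),
    cntW p q (xs ++ [c]) =
      cntW p q xs + (if pvTermW (shift2 p q xs).1 (shift2 p q xs).2 c then 1 else 0) := by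
  induction xs with
  | nil => intro p q c; simp [cntW, shift2]
  | cons x t ih =>
    intro p q c
    simp only [List.cons_append, cntW, shift2, ih]
    ring

lemma shift2_snoc_pair (cur : List Char) (p q : Option Char) (hInv : pvInv p q cur) (c : Char)
    (hc : PySem.Chars.isspace c = false) :
    (if pvTermW (shift2 none none cur.reverse).1 (shift2 none none cur.reverse).2 c then (1:Int) else 0)
      = (if pvTermB p q c then 1 else 0) := by
  obtain ⟨hnw, hm⟩ := hInv
  match cur with
  | [] =>
    simp only [List.reverse_nil, shift2, pvTermW, pvTermB]
    rcases hq : q with _ | b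
    · simp
    · rw [hq] at hm; simp only [pvOptWs] at hm
      have hbv : pvIsVowel b = false := by
        by_contra hx
        have := vowel_not_ws b (by revert hx; cases pvIsVowel b <;> simp)
        rw [hm] at this; exact absurd this (by simp)
      simp [hbv]
  | [x] =>
    obtain ⟨hqx, hpw⟩ := hm
    subst hqx
    simp only [List.reverse_cons, List.reverse_nil, List.nil_append, shift2, pvTermW, pvTermB]
    rcases hp : p with _ | a
    · simp
    · rw [hp] at hpw; simp only [pvOptWs] at hpw
      simp [hpw]
  | x :: y :: t =>
    obtain ⟨hqx, hpy⟩ := hm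
    subst hqx; subst hpy
    simp only [List.all_cons, Bool.and_eq_true, Bool.not_eq_true'] at hnw
    have hx : PySem.Chars.isspace x = false := hnw.1
    have hy : PySem.Chars.isspace y = false := hnw.2.1
    have hsh : shift2 none none (x :: y :: t).reverse = (some y, some x) := by
      have haux : ∀ (l : List Char) (p q : Option Char) (a b : Char),
          shift2 p q (l ++ [b, a]) = (some b, some a) := by
        intro l
        induction l with
        | nil => intro p q a b; rfl
        | cons z zs ih => intro p q a b; simp only [List.cons_append, shift2]; exact ih _ _ _ _
      have h2 : (x :: y :: t).reverse = t.reverse ++ [y, x] := by simp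
      rw [h2]; exact haux _ _ _ _ _
    rw [hsh]
    simp only [pvTermW, pvTermB, hy, hc, Bool.not_false, Bool.and_true]
    by_cases h1 : pvIsVowel x <;> by_cases h2 : pvIsVowel y <;> by_cases h3 : pvIsVowel c <;>
      simp [h1, h2, h3]

lemma key (l : List Char) : ∀ (p q : Option Char) (cur : List Char), pvInv p q cur →
    pvS (PySem.Chars.split₀.go l cur []) = cntW none none cur.reverse + cntB p q l := by
  induction l with
  | nil =>
    intro p q cur hInv
    simp only [PySem.Chars.split₀.go, cntB_nil]
    split_ifs with h
    · simp_all [List.isEmpty_iff, pvS, cntW]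
    · simp [pvS]
  | cons c rest ih =>
    intro p q cur hInv
    obtain ⟨hnw, hm⟩ := hInv
    simp only [PySem.Chars.split₀.go]
    by_cases hws : PySem.Chars.isspace c = true
    · have hterm : (if pvTermB p q c then (1:Int) else 0) = 0 := by
        simp [pvTermB, hws]
      rw [if_pos hws]
      have hInv2 : pvInv q (some c) [] := ⟨rfl, by simpa [pvOptWs] using hws⟩
      rcases cur with _ | ⟨x, t⟩
      · rw [if_pos (show ([] : List Char).isEmpty = true from rfl)]
        rw [ih q (some c) [] hInv2]
        simp [cntB, cntW, hterm]
      · rw [if_neg (by simp)]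
        rw [go_acc, pvS_append, ih q (some c) [] hInv2]
        simp only [cntB, hterm, List.reverse_cons]
        simp [pvS, cntW]
    · rw [if_neg hws]
      have hc : PySem.Chars.isspace c = false := by
        cases hx : PySem.Chars.isspace c; rfl; exact absurd hx hws
      have hInv2 : pvInv q (some c) (c :: cur) := by
        refine ⟨by simp [hc, hnw], ?_⟩
        rcases cur with _ | ⟨x, t⟩
        · exact ⟨rfl, hm⟩
        · rcases t with _ | ⟨y, t2⟩
          · exact ⟨rfl, hm.1⟩
          · exact ⟨rfl, hm.1⟩
      rw [ih q (some c) (c :: cur) hInv2]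
      rw [List.reverse_cons, cntW_snoc]
      rw [shift2_snoc_pair cur p q ⟨hnw, hm⟩ c hc]
      simp only [cntB]
      omega

-- ===== VERDICT (by name: the statement is the Claim_ definition above) =====
theorem vowel_consonants_spec : Claim_equal_vowel_consonants := by
  intro s _
  unfold Spec_vowel_consonants vowel_consonants vowel_consonants_alt
  rw [foldA_eq, vcScanB_acc]
  have h0 : PySem.Chars.split₀ s.toList = PySem.Chars.split₀.go s.toList [] [] := rfl
  rw [h0, key s.toList none none [] ⟨rfl, by trivial⟩]
  simp [cntW]
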